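-- pv_equiv track=rewrite | github.com/imranpollob/smart-contract-hgnn | src/hypergraph/features.py | _compute_access_patterns
-- ===== SOURCE A (Python) =====
-- def _compute_access_patterns(cfg: dict, state_vars: list[dict]) -> dict[str, str]:
--     """
--     Determine access pattern (read_only / write_only / read_write) for each state var.
--     Computed from CFG node-level read/write tracking across all functions.
--     """
--     var_names = {v["name"] for v in state_vars}
--     reads = set()
--     writes = set()
--
--     for func_name, nodes in cfg.items():
--         for node in nodes:
--             for vn in node.get("state_vars_read", []):
--                 if vn in var_names:
--                     reads.add(vn)
--             for vn in node.get("state_vars_written", []):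
--                 if vn in var_names:
--                     writes.add(vn)
--
--     patterns = {}
--     for vn in var_names:
--         is_read = vn in reads
--         is_written = vn in writes
--         if is_read and is_written:
--             patterns[vn] = "read_write"
--         elif is_read:
--             patterns[vn] = "read_only"
--         elif is_written:
--             patterns[vn] = "write_only"
--         else:
--             patterns[vn] = "read_only"  # default for unused vars
--
--     return patterns
-- ===== SOURCE B (Python) =====
-- def _compute_access_patterns(cfg: dict, state_vars: list[dict]) -> dict[str, str]:
--     """Per-variable rescan of the CFG instead of a pre-built reads/writes index."""
--     all_nodes = [node for nodes in cfg.values() for node in nodes]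
--
--     def used(vn, key):
--         return any(vn in node.get(key, []) for node in all_nodes)
--
--     patterns = {}
--     for vn in {v["name"] for v in state_vars}:
--         r = used(vn, "state_vars_read")
--         w = used(vn, "state_vars_written")
--         patterns[vn] = "read_write" if (r and w) else ("write_only" if (w and not r) else "read_only")
--     return patterns
-- ===== Notes on version B (the rewrite author's own statement) =====
-- stated objective: alternative
-- what changed: B drops A's single-pass construction of global reads/writes index sets and instead flattens the CFG once and, for each distinct state-var name, rescans the node list with any() for read/write use, collapsing A's four-way branch to a three-way conditional expression.
import Mathlib
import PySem

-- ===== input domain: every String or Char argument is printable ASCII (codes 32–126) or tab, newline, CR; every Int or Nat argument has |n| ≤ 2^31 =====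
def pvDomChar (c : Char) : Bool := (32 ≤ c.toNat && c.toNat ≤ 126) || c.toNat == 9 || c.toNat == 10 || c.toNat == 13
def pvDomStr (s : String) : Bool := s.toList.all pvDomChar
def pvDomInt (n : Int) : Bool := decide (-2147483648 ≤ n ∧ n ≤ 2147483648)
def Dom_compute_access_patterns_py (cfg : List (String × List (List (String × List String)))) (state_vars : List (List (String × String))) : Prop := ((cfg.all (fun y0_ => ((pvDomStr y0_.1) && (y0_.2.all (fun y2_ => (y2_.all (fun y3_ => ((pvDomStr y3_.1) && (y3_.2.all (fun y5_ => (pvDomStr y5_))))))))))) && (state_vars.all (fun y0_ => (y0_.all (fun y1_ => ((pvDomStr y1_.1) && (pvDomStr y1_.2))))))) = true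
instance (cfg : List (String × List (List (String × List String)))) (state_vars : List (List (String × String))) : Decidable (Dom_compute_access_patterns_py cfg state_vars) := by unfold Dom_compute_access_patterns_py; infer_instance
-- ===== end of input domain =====

-- B replaces A's pre-built global reads/writes index sets by a per-variable any()-rescan of the
-- flattened CFG node list (objective: alternative decomposition, same results).

-- ===== PORT A =====
-- node.get(k, []) on a dict node
def pvGetListD (node : List (String × List String)) (k : String) : List String :=
  PySem.Dict.getD (PySem.Dict.mk node) k []

-- v["name"]; exact under Pre_ (key "name" present in every v; a missing key is a KeyError, excluded by Pre_)
def pvName (v : List (String × String)) : String :=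
  PySem.Dict.getD (PySem.Dict.mk v) "name" ""

def compute_access_patterns_py (cfg : List (String × List (List (String × List String)))) (state_vars : List (List (String × String))) : List (String × String) :=
  let var_names : PySem.Set String := PySem.Set.ofList (state_vars.map pvName)
  let rw : PySem.Set String × PySem.Set String :=
    cfg.foldl (fun acc fn =>
      fn.2.foldl (fun acc node =>
        let r := (pvGetListD node "state_vars_read").foldl
          (fun r vn => if PySem.Set.contains var_names vn then PySem.Set.add r vn else r) acc.1
        let w := (pvGetListD node "state_vars_written").foldl
          (fun w vn => if PySem.Set.contains var_names vn then PySem.Set.add w vn else w) acc.2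
        (r, w)) acc) (PySem.Set.empty, PySem.Set.empty)
  let patterns : PySem.Dict String String :=
    var_names.foldl (fun d vn =>
      let is_read := PySem.Set.contains rw.1 vn
      let is_written := PySem.Set.contains rw.2 vn
      if is_read && is_written then d.insert vn "read_write"
      else if is_read then d.insert vn "read_only"
      else if is_written then d.insert vn "write_only"
      else d.insert vn "read_only") PySem.Dict.empty
  patterns.items

-- ===== PORT B =====
def pvUsed (all_nodes : List (List (String × List String))) (vn key : String) : Bool :=
  all_nodes.any (fun node => (PySem.Dict.getD (PySem.Dict.mk node) key []).contains vn)

def compute_access_patterns_py_alt (cfg : List (String × List (List (String × List String)))) (state_vars : List (List (String × String))) : List (String × String) :=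
  let all_nodes : List (List (String × List String)) := cfg.flatMap (fun fn => fn.2)
  let patterns : PySem.Dict String String :=
    (PySem.Set.ofList (state_vars.map pvName)).foldl (fun d vn =>
      let r := pvUsed all_nodes vn "state_vars_read"
      let w := pvUsed all_nodes vn "state_vars_written"
      d.insert vn (if r && w then "read_write" else if w && !r then "write_only" else "read_only"))
      PySem.Dict.empty
  patterns.items

-- ===== PRECONDITION & SPEC =====
-- Pre_ excludes exactly the inputs where A raises KeyError: a state-var dict without a "name" key.
def Pre_compute_access_patterns_py (cfg : List (String × List (List (String × List String)))) (state_vars : List (List (String × String))) : Prop :=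
  ∀ v ∈ state_vars, (PySem.Dict.mk v).contains "name" = true
instance (cfg : List (String × List (List (String × List String)))) (state_vars : List (List (String × String))) : Decidable (Pre_compute_access_patterns_py cfg state_vars) := by unfold Pre_compute_access_patterns_py; infer_instance
def pvWitness_compute_access_patterns_py : (List (String × List (List (String × List String)))) × (List (List (String × String))) :=
  ([("f", [[("state_vars_read", ["x"])]])], [[("name", "x")], [("name", "y")]])
def Spec_compute_access_patterns_py (cfg : List (String × List (List (String × List String)))) (state_vars : List (List (String × String))) (out : List (String × String)) : Prop := out = compute_access_patterns_py_alt cfg state_vars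
instance (cfg : List (String × List (List (String × List String)))) (state_vars : List (List (String × String))) (out : List (String × String)) : Decidable (Spec_compute_access_patterns_py cfg state_vars out) := by unfold Spec_compute_access_patterns_py; infer_instance

-- ===== CLAIM (what is proved, stated in full; the proofs are below) =====
def Claim_equal_compute_access_patterns_py : Prop := ∀ (cfg : List (String × List (List (String × List String)))) (state_vars : List (List (String × String))), Dom_compute_access_patterns_py cfg state_vars → Pre_compute_access_patterns_py cfg state_vars → Spec_compute_access_patterns_py cfg state_vars (compute_access_patterns_py cfg state_vars)

-- ===== LEMMAS AND PROOFS =====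

-- membership in the filtered-add inner fold
lemma mem_filterAdd (l : List String) (V s : PySem.Set String) (x : String) :
    x ∈ l.foldl (fun r vn => if PySem.Set.contains V vn then PySem.Set.add r vn else r) s ↔
      x ∈ s ∨ (x ∈ l ∧ PySem.Set.contains V x = true) := by
  induction l generalizing s with
  | nil => simp
  | cons a l ih =>
    simp only [List.foldl_cons, ih]
    by_cases h : PySem.Set.contains V a = true
    · simp only [h, if_pos]
      rw [PySem.Set.mem_add]
      constructor
      · rintro ((hs | rfl) | hl)
        · exact Or.inl hs
        · exact Or.inr ⟨List.mem_cons_self .., h⟩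
        · exact Or.inr ⟨List.mem_cons_of_mem _ hl.1, hl.2⟩
      · rintro (hs | ⟨hm, hc⟩)
        · exact Or.inl (Or.inl hs)
        · rcases List.mem_cons.mp hm with rfl | hm
          · exact Or.inl (Or.inr rfl)
          · exact Or.inr ⟨hm, hc⟩
    · simp only [h, if_neg, Bool.false_eq_true, not_false_iff]
      constructor
      · rintro (hs | hl)
        · exact Or.inl hs
        · exact Or.inr ⟨List.mem_cons_of_mem _ hl.1, hl.2⟩
      · rintro (hs | ⟨hm, hc⟩)
        · exact Or.inl hs
        · rcases List.mem_cons.mp hm with rfl | hm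
          · exact absurd hc h
          · exact Or.inr ⟨hm, hc⟩

-- A's read/write collection pass, characterised (both components at once)
lemma mem_rwFold (cfg : List (String × List (List (String × List String)))) (V : PySem.Set String)
    (acc0 : PySem.Set String × PySem.Set String) (x : String) (key : String)
    (sel : PySem.Set String × PySem.Set String → PySem.Set String)
    (hsel : (sel = Prod.fst ∧ key = "state_vars_read") ∨ (sel = Prod.snd ∧ key = "state_vars_written")) :
    x ∈ sel (cfg.foldl (fun acc fn =>
      fn.2.foldl (fun acc node =>
        let r := (pvGetListD node "state_vars_read").foldl
          (fun r vn => if PySem.Set.contains V vn then PySem.Set.add r vn else r) acc.1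
        let w := (pvGetListD node "state_vars_written").foldl
          (fun w vn => if PySem.Set.contains V vn then PySem.Set.add w vn else w) acc.2
        (r, w)) acc) acc0) ↔
      x ∈ sel acc0 ∨ ((∃ fn ∈ cfg, ∃ node ∈ fn.2, x ∈ pvGetListD node key) ∧ PySem.Set.contains V x = true) := by
  induction cfg generalizing acc0 with
  | nil => simp
  | cons fn cfg ih =>
    simp only [List.foldl_cons, ih]
    have hnodes : ∀ (nodes : List (List (String × List String))) (acc : PySem.Set String × PySem.Set String),
        x ∈ sel (nodes.foldl (fun acc node =>
          let r := (pvGetListD node "state_vars_read").foldl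
            (fun r vn => if PySem.Set.contains V vn then PySem.Set.add r vn else r) acc.1
          let w := (pvGetListD node "state_vars_written").foldl
            (fun w vn => if PySem.Set.contains V vn then PySem.Set.add w vn else w) acc.2
          (r, w)) acc) ↔
        x ∈ sel acc ∨ ((∃ node ∈ nodes, x ∈ pvGetListD node key) ∧ PySem.Set.contains V x = true) := by
      intro nodes
      induction nodes with
      | nil => simp
      | cons nd nodes ihn =>
        intro acc
        simp only [List.foldl_cons, ihn]
        rcases hsel with ⟨rfl, rfl⟩ | ⟨rfl, rfl⟩ <;>
        · simp only [mem_filterAdd, List.mem_cons]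
          constructor
          · rintro ((hs | ⟨hm, hc⟩) | ⟨⟨nd', hnd', hm'⟩, hc⟩)
            · exact Or.inl hs
            · exact Or.inr ⟨⟨nd, Or.inl rfl, hm⟩, hc⟩
            · exact Or.inr ⟨⟨nd', Or.inr hnd', hm'⟩, hc⟩
          · rintro (hs | ⟨⟨nd', hnd', hm'⟩, hc⟩)
            · exact Or.inl (Or.inl hs)
            · rcases hnd' with rfl | hnd'
              · exact Or.inl (Or.inr ⟨hm', hc⟩)
              · exact Or.inr ⟨⟨nd', hnd', hm'⟩, hc⟩
    rw [hnodes]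
    constructor
    · rintro ((hs | ⟨⟨nd, hnd, hm⟩, hc⟩) | ⟨⟨fn', hfn', nd, hnd, hm⟩, hc⟩)
      · exact Or.inl hs
      · exact Or.inr ⟨⟨fn, List.mem_cons_self .., nd, hnd, hm⟩, hc⟩
      · exact Or.inr ⟨⟨fn', List.mem_cons_of_mem _ hfn', nd, hnd, hm⟩, hc⟩
    · rintro (hs | ⟨⟨fn', hfn', nd, hnd, hm⟩, hc⟩)
      · exact Or.inl (Or.inl hs)
      · rcases List.mem_cons.mp hfn' with rfl | hfn'
        · exact Or.inl (Or.inr ⟨⟨nd, hnd, hm⟩, hc⟩)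
        · exact Or.inr ⟨⟨fn', hfn', nd, hnd, hm⟩, hc⟩

-- A's set membership agrees with B's any()-rescan, for vars in var_names
lemma contains_rw_eq_used (cfg : List (String × List (List (String × List String)))) (V : PySem.Set String)
    (x : String) (hx : x ∈ V) (key : String)
    (sel : PySem.Set String × PySem.Set String → PySem.Set String)
    (hsel : (sel = Prod.fst ∧ key = "state_vars_read") ∨ (sel = Prod.snd ∧ key = "state_vars_written")) :
    PySem.Set.contains (sel (cfg.foldl (fun acc fn =>
      fn.2.foldl (fun acc node =>
        let r := (pvGetListD node "state_vars_read").foldl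
          (fun r vn => if PySem.Set.contains V vn then PySem.Set.add r vn else r) acc.1
        let w := (pvGetListD node "state_vars_written").foldl
          (fun w vn => if PySem.Set.contains V vn then PySem.Set.add w vn else w) acc.2
        (r, w)) acc) (PySem.Set.empty, PySem.Set.empty))) x
      = pvUsed (cfg.flatMap (fun fn => fn.2)) x key := by
  have hV : PySem.Set.contains V x = true := (PySem.Set.contains_iff V x).mpr hx
  cases hu : pvUsed (cfg.flatMap (fun fn => fn.2)) x key with
  | false =>
    rw [← Bool.not_eq_true]
    intro hc
    have hm := (mem_rwFold cfg V (PySem.Set.empty, PySem.Set.empty) x key sel hsel).mp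
      ((PySem.Set.contains_iff _ _).mp hc)
    rcases hm with hs | ⟨⟨fn, hfn, nd, hnd, hmem⟩, _⟩
    · rcases hsel with ⟨rfl, _⟩ | ⟨rfl, _⟩ <;> simp [PySem.Set.empty] at hs
    · have ht : pvUsed (cfg.flatMap (fun fn => fn.2)) x key = true := by
        simp only [pvUsed, List.any_eq_true]
        exact ⟨nd, List.mem_flatMap.mpr ⟨fn, hfn, hnd⟩, by
          simpa [pvGetListD, List.contains_iff_mem] using hmem⟩
      rw [hu] at ht
      exact Bool.false_ne_true ht
  | true =>
    apply (PySem.Set.contains_iff _ _).mpr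
    simp only [pvUsed, List.any_eq_true] at hu
    obtain ⟨nd, hnd, hmem⟩ := hu
    obtain ⟨fn, hfn, hnd'⟩ := List.mem_flatMap.mp hnd
    exact (mem_rwFold cfg V (PySem.Set.empty, PySem.Set.empty) x key sel hsel).mpr
      (Or.inr ⟨⟨fn, hfn, nd, hnd', by simpa [pvGetListD, List.contains_iff_mem] using hmem⟩, hV⟩)

-- ===== VERDICT (by name: the statement is the Claim_ definition above) =====
theorem compute_access_patterns_py_spec : Claim_equal_compute_access_patterns_py := by
  intro cfg state_vars _ _
  unfold Spec_compute_access_patterns_py compute_access_patterns_py compute_access_patterns_py_alt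
  simp only []
  congr 1
  apply PySem.List.foldl_congr_mem
  intro d vn hvn
  have hv : vn ∈ PySem.Set.ofList (state_vars.map pvName) := hvn
  have hr := contains_rw_eq_used cfg (PySem.Set.ofList (state_vars.map pvName)) vn hv
    "state_vars_read" Prod.fst (Or.inl ⟨rfl, rfl⟩)
  have hw := contains_rw_eq_used cfg (PySem.Set.ofList (state_vars.map pvName)) vn hv
    "state_vars_written" Prod.snd (Or.inr ⟨rfl, rfl⟩)
  simp only [hr, hw]
  cases hR : pvUsed (cfg.flatMap (fun fn => fn.2)) vn "state_vars_read" <;>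
    cases hW : pvUsed (cfg.flatMap (fun fn => fn.2)) vn "state_vars_written" <;> simp
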